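-- pv_equiv track=rewrite | github.com/smiks/CoolTools | cooltools.py | pandigitals_generator
-- ===== SOURCE A (Python) =====
-- from itertools import chain, permutations, product
--
-- def pandigitals_generator(lst):
--     """
--     Generates pandigital numbers from alphabet received as parameter lst
--     :param lst: Alphabet used for pandigital numbers.
--     :return: Pandigital number.
--     """
--     for i in lst:
--         try:
--             int(i)
--         except ValueError:
--             return []
--     if any(i < 0 for i in lst):
--         return -1
--     for i in permutations(lst):
--         yield int(''.join(map(str, i)))
-- ===== SOURCE B (Python) =====
-- def _rec(remaining, acc):
--     if not remaining:
--         yield int(acc)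
--         return
--     for k in range(len(remaining)):
--         yield from _rec(remaining[:k] + remaining[k + 1:], acc + str(remaining[k]))
--
--
-- def pandigitals_generator(lst):
--     if any(i < 0 for i in lst):
--         return
--     yield from _rec(lst, '')
-- ===== Notes on version B (the rewrite author's own statement) =====
-- stated objective: alternative
-- what changed: B replaces itertools.permutations-then-join-then-int with a single recursive generator that picks each remaining element in index order and carries the digit string as an accumulator, yielding the parsed int at each leaf (no tuple materialisation).
import Mathlib
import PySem

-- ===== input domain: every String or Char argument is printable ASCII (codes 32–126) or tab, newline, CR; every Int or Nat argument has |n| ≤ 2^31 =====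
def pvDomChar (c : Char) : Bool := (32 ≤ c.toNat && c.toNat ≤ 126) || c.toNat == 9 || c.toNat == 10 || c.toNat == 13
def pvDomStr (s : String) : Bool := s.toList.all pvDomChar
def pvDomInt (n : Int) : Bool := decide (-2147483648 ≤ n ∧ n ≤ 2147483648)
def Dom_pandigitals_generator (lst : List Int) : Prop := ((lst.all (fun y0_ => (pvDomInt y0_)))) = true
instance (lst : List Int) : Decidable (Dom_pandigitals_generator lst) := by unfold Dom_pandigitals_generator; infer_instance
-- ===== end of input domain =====

-- B replaces the permutations-of-tuples + join pipeline by one recursive walk with a string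
-- accumulator, yielding the parsed int at each leaf; same order, same values (alternative, not faster).
-- Both programs are generators in Python; we port the list of yielded values.

-- ===== PORT A =====
-- int(''.join(map(str, perm))): the joined string of decimal reprs, then int(...).
-- Under Pre_ the string is nonempty and all-digits, so ofStr? always returns some; getD 0 never fires.
def pvParseCat (s : String) : Int := (PySem.Int.ofStr? s).getD 0

-- ''.join(map(str, p))
def pvJoinStr : List Int → String
  | [] => ""
  | x :: p => PySem.Int.toStr x ++ pvJoinStr p

-- itertools.permutations(xs): all permutations in positional-lexicographic order,
-- duplicates treated as distinct positions; fuel = xs.length (exact: length drops by 1 each level).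
def pvPermsA : Nat → List Int → List (List Int)
  | 0, _ => [[]]
  | n + 1, xs =>
    if xs.isEmpty then [[]]
    else (List.range xs.length).flatMap fun k =>
      (pvPermsA n (xs.eraseIdx k)).map (fun p => xs.getD k 0 :: p)

def pandigitals_generator (lst : List Int) : List Int :=
  -- the first loop runs int(i) on each element; for ints it never raises (no-op here)
  if lst.any (fun i => i < 0) then []   -- 'return -1' in the generator: yields nothing
  else (pvPermsA lst.length lst).map (fun p => pvParseCat (pvJoinStr p))

-- ===== PORT B =====
-- _rec(remaining, acc): pick each remaining element in index order, extend the digit string, parse at the leaf.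
def pvRecB : Nat → List Int → String → List Int
  | 0, _, acc => [pvParseCat acc]
  | n + 1, remaining, acc =>
    if remaining.isEmpty then [pvParseCat acc]
    else (List.range remaining.length).flatMap fun k =>
      pvRecB n (remaining.eraseIdx k) (acc ++ PySem.Int.toStr (remaining.getD k 0))

def pandigitals_generator_alt (lst : List Int) : List Int :=
  if lst.any (fun i => i < 0) then []
  else pvRecB lst.length lst ""

-- ===== PRECONDITION & SPEC =====
-- Pre_ excludes only the empty list, on which both A and B raise ValueError (int('') at the single empty permutation).
def Pre_pandigitals_generator (lst : List Int) : Prop := lst ≠ []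
instance (lst : List Int) : Decidable (Pre_pandigitals_generator lst) := by unfold Pre_pandigitals_generator; infer_instance
def pvWitness_pandigitals_generator : List Int := [2, 0, 1]

def Spec_pandigitals_generator (lst : List Int) (out : List Int) : Prop := out = pandigitals_generator_alt lst
instance (lst : List Int) (out : List Int) : Decidable (Spec_pandigitals_generator lst out) := by unfold Spec_pandigitals_generator; infer_instance

-- ===== CLAIM (what is proved, stated in full; the proofs are below) =====
def Claim_equal_pandigitals_generator : Prop := ∀ (lst : List Int), Dom_pandigitals_generator lst → Pre_pandigitals_generator lst → Spec_pandigitals_generator lst (pandigitals_generator lst)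

-- ===== LEMMAS AND PROOFS =====

theorem pvRecB_eq_map (n : Nat) : ∀ (xs : List Int) (acc : String),
    pvRecB n xs acc = (pvPermsA n xs).map (fun p => pvParseCat (acc ++ pvJoinStr p)) := by
  induction n with
  | zero =>
    intro xs acc
    simp [pvRecB, pvPermsA, pvJoinStr]
  | succ n ih =>
    intro xs acc
    by_cases h : xs.isEmpty
    · simp [pvRecB, pvPermsA, h, pvJoinStr]
    · simp only [pvRecB, pvPermsA, h, Bool.false_eq_true, if_false, List.map_flatMap, List.map_map]
      refine List.flatMap_congr ?_
      intro k _
      rw [ih]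
      refine List.map_congr_left ?_
      intro p _
      simp [pvJoinStr, Function.comp, String.append_assoc]

-- ===== VERDICT (by name: the statement is the Claim_ definition above) =====
theorem pandigitals_generator_spec : Claim_equal_pandigitals_generator := by
  intro lst _ _
  unfold Spec_pandigitals_generator pandigitals_generator pandigitals_generator_alt
  by_cases h : lst.any (fun i => i < 0)
  · simp [h]
  · simp only [h, Bool.false_eq_true, if_false]
    rw [pvRecB_eq_map]
    refine (List.map_congr_left ?_).symm
    intro p _
    simp
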